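-- pv_equiv track=rewrite | github.com/jermnelson/eff-passphrase-cli | run.py | _number_subsitution
-- ===== SOURCE A (Python) =====
-- number_lookup = {
--   'o': '0',
--   'l': '1',
--   'e': '3',
--   's': '5',
--   'b': '6',
--   'g': '9'
-- }
--
-- def _number_subsitution(passphrase: str, count: int) -> str:
--     """Substitutes character for a number
--
--     args:
--       - passphrase: incoming passphrase
--       - count: number of characters to substitute
--     returns:
--       - modified passphrase
--     """
--     mod_passphrase = ''
--     total = 0
--     for i,char in enumerate(passphrase):
--         if total >= count:
--            mod_passphrase += passphrase[i:]
--            break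
--         if char.lower() in number_lookup: # and total >= count:
--             mod_passphrase += number_lookup[char.lower()]
--             total += 1
--         else:
--             mod_passphrase += char
--     return mod_passphrase
-- ===== SOURCE B (Python) =====
-- number_lookup = {
--   'o': '0',
--   'l': '1',
--   'e': '3',
--   's': '5',
--   'b': '6',
--   'g': '9'
-- }
--
-- def _number_subsitution(passphrase: str, count: int) -> str:
--     # Two passes: collect the indices of substitutable letters, keep the
--     # first max(count, 0) of them, then rebuild the string in one join.
--     idxs = [i for i, c in enumerate(passphrase) if c.lower() in number_lookup]
--     targets = set(idxs[:max(count, 0)])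
--     return ''.join(number_lookup[c.lower()] if i in targets else c
--                    for i, c in enumerate(passphrase))
-- ===== Notes on version B (the rewrite author's own statement) =====
-- stated objective: alternative
-- what changed: Replaced the single scan with a running substitution counter and early break by two passes: collect the indices of substitutable letters, keep the first max(count,0) in a set, then rebuild the whole string with one join over enumerate.
import Mathlib
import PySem

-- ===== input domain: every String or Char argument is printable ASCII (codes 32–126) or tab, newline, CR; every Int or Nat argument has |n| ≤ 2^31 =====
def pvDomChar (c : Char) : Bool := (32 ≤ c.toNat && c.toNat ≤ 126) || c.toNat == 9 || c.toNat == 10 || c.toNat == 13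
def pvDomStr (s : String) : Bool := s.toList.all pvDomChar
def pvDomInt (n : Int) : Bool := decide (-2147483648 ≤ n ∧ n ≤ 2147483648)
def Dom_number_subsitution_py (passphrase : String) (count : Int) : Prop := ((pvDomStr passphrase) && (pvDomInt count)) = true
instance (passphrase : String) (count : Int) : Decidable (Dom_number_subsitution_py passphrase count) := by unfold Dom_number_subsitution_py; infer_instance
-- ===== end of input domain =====

-- B rebuilds the string in two passes (index-collection + join) instead of A's single
-- counted scan with an early break; same values, alternative decomposition.

-- shared module constant: number_lookup (single-char keys/values, as Chars)
def numberLookup : PySem.Dict Char Char :=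
  PySem.Dict.ofList [('o', '0'), ('l', '1'), ('e', '3'), ('s', '5'), ('b', '6'), ('g', '9')]

-- number_lookup lookup applied to char.lower()
def nsLook (c : Char) : Option Char := numberLookup.get? (PySem.Chars.lowerChar c)

-- ===== PORT A =====
-- the loop of A: `cs` is the remaining suffix of the passphrase (= passphrase[i:],
-- which is exactly what `mod_passphrase += passphrase[i:]` appends on break)
def nsLoopA (count : Int) : List Char → List Char → Int → List Char
  | [], mod, _ => mod
  | c :: rest, mod, total =>
    if total ≥ count then mod ++ (c :: rest)
    else
      match nsLook c with
      | some d => nsLoopA count rest (mod ++ [d]) (total + 1)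
      | none => nsLoopA count rest (mod ++ [c]) total

def number_subsitution_py (passphrase : String) (count : Int) : String :=
  String.mk (nsLoopA count passphrase.toList [] 0)

-- ===== PORT B =====
def number_subsitution_py_alt (passphrase : String) (count : Int) : String :=
  let en := PySem.List.enumerate passphrase.toList
  let idxs := (en.filter (fun p => (nsLook p.2).isSome)).map (·.1)
  let targets : PySem.Set Int := PySem.Set.ofList (idxs.take (max count 0).toNat)
  String.mk (en.map (fun p => if PySem.Set.contains targets p.1 then (nsLook p.2).getD p.2 else p.2))

-- ===== PRECONDITION & SPEC =====
def Spec_number_subsitution_py (passphrase : String) (count : Int) (out : String) : Prop := out = number_subsitution_py_alt passphrase count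
instance (passphrase : String) (count : Int) (out : String) : Decidable (Spec_number_subsitution_py passphrase count out) := by unfold Spec_number_subsitution_py; infer_instance

-- ===== CLAIM (what is proved, stated in full; the proofs are below) =====
def Claim_equal_number_subsitution_py : Prop := ∀ (passphrase : String) (count : Int), Dom_number_subsitution_py passphrase count → Spec_number_subsitution_py passphrase count (number_subsitution_py passphrase count)

-- ===== LEMMAS AND PROOFS =====

-- common specification: substitute the first k substitutable characters
def nsSubst (k : Nat) : List Char → List Char
  | [] => []
  | c :: rest =>
    if k = 0 then c :: rest
    else
      match nsLook c with
      | some d => d :: nsSubst (k - 1) rest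
      | none => c :: nsSubst k rest

theorem nsLoopA_eq (count : Int) (l : List Char) :
    ∀ (mod : List Char) (total : Int),
      nsLoopA count l mod total = mod ++ nsSubst (count - total).toNat l := by
  induction l with
  | nil => intro mod total; simp [nsLoopA, nsSubst]
  | cons c rest ih =>
    intro mod total
    by_cases h : total ≥ count
    · have hk : (count - total).toNat = 0 := by omega
      simp [nsLoopA, nsSubst, h, hk]
    · have hk : (count - total).toNat ≠ 0 := by omega
      have hk1 : (count - (total + 1)).toNat = (count - total).toNat - 1 := by omega
      cases hlook : nsLook c with
      | some d =>
        simp [nsLoopA, h, hlook, nsSubst, hk, ih, hk1]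
      | none =>
        simp [nsLoopA, h, hlook, nsSubst, hk, ih]

-- indices produced by B's first pass, starting at offset n
def nsIdxs (n : Int) : List Char → List Int
  | [] => []
  | c :: rest => if (nsLook c).isSome then n :: nsIdxs (n + 1) rest else nsIdxs (n + 1) rest

theorem nsIdxs_eq (l : List Char) : ∀ (n : Int),
    ((PySem.List.enumerate l n).filter (fun p => (nsLook p.2).isSome)).map (·.1) = nsIdxs n l := by
  induction l with
  | nil => intro n; simp [nsIdxs, PySem.List.enumerate_nil]
  | cons c rest ih =>
    intro n
    by_cases h : (nsLook c).isSome
    · simp [PySem.List.enumerate_cons, nsIdxs, h, ih]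
    · simp [PySem.List.enumerate_cons, nsIdxs, h, ih]

theorem nsIdxs_ge (l : List Char) : ∀ (n i : Int), i ∈ nsIdxs n l → n ≤ i := by
  induction l with
  | nil => intro n i h; simp [nsIdxs] at h
  | cons c rest ih =>
    intro n i h
    simp only [nsIdxs] at h
    split at h
    · rcases List.mem_cons.mp h with rfl | h
      · omega
      · have := ih (n + 1) i h; omega
    · have := ih (n + 1) i h; omega

-- B's second pass over enumerate with a fixed target list
def nsMapT (ts : List Int) (n : Int) (l : List Char) : List Char :=
  (PySem.List.enumerate l n).map
    (fun p => if PySem.Set.contains (PySem.Set.ofList ts) p.1 then (nsLook p.2).getD p.2 else p.2)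

theorem nsMapT_nil (l : List Char) : ∀ (n : Int), nsMapT [] n l = l := by
  induction l with
  | nil => intro n; simp [nsMapT, PySem.List.enumerate_nil]
  | cons c rest ih =>
    intro n
    simp only [nsMapT, PySem.List.enumerate_cons, List.map_cons]
    have : nsMapT [] (n + 1) rest = rest := ih (n + 1)
    simp only [nsMapT] at this
    simp [PySem.Set.ofList, this]

theorem contains_ofList_iff {α : Type} [BEq α] [LawfulBEq α] (ts : List α) (x : α) :
    PySem.Set.contains (PySem.Set.ofList ts) x = true ↔ x ∈ ts := by
  rw [PySem.Set.contains_iff, PySem.Set.mem_ofList]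

theorem nsMapT_eq_of_mem_iff (l : List Char) : ∀ (ts ts' : List Int) (n : Int),
    (∀ i ∈ PySem.List.enumerate l n, (i.1 ∈ ts ↔ i.1 ∈ ts')) →
    nsMapT ts n l = nsMapT ts' n l := by
  intro ts ts' n h
  simp only [nsMapT]
  apply List.map_congr_left
  intro p hp
  have := h p hp
  by_cases hm : p.1 ∈ ts
  · rw [if_pos ((contains_ofList_iff ts p.1).mpr hm),
        if_pos ((contains_ofList_iff ts' p.1).mpr (this.mp hm))]
  · rw [if_neg (by simp [contains_ofList_iff]; exact hm),
        if_neg (by simp [contains_ofList_iff]; exact fun hx => hm (this.mpr hx))]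

theorem enumerate_fst_ge (l : List Char) : ∀ (n : Int) (p : Int × Char),
    p ∈ PySem.List.enumerate l n → n ≤ p.1 := by
  induction l with
  | nil => intro n p h; simp [PySem.List.enumerate_nil] at h
  | cons c rest ih =>
    intro n p h
    rw [PySem.List.enumerate_cons] at h
    rcases List.mem_cons.mp h with rfl | h
    · omega
    · have := ih (n + 1) p h; omega

theorem nsMapT_main (l : List Char) : ∀ (n : Int) (k : Nat),
    nsMapT ((nsIdxs n l).take k) n l = nsSubst k l := by
  induction l with
  | nil => intro n k; simp [nsMapT, nsSubst, PySem.List.enumerate_nil]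
  | cons c rest ih =>
    intro n k
    rcases Nat.eq_zero_or_pos k with rfl | hk
    · simp [List.take_zero, nsMapT_nil, nsSubst]
    · have hk0 : k ≠ 0 := by omega
      by_cases h : (nsLook c).isSome
      · obtain ⟨d, hd⟩ := Option.isSome_iff_exists.mp h
        have hidx : nsIdxs n (c :: rest) = n :: nsIdxs (n + 1) rest := by
          simp [nsIdxs, h]
        obtain ⟨j, rfl⟩ : ∃ j, k = j + 1 := ⟨k - 1, by omega⟩
        rw [hidx, List.take_succ_cons]
        simp only [nsMapT, PySem.List.enumerate_cons, List.map_cons]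
        have hmemn : PySem.Set.contains
            (PySem.Set.ofList (n :: (nsIdxs (n + 1) rest).take j)) n = true :=
          (contains_ofList_iff _ _).mpr (List.mem_cons_self)
        rw [if_pos hmemn, hd]
        have htail :
            (PySem.List.enumerate rest (n + 1)).map
              (fun p => if PySem.Set.contains
                  (PySem.Set.ofList (n :: (nsIdxs (n + 1) rest).take j)) p.1
                then (nsLook p.2).getD p.2 else p.2)
            = nsMapT ((nsIdxs (n + 1) rest).take j) (n + 1) rest := by
          have := nsMapT_eq_of_mem_iff rest (n :: (nsIdxs (n + 1) rest).take j)
            ((nsIdxs (n + 1) rest).take j) (n + 1) (by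
              intro p hp
              have hge := enumerate_fst_ge rest (n + 1) p hp
              constructor
              · intro hx
                rcases List.mem_cons.mp hx with h1 | h1
                · omega
                · exact h1
              · intro hx; exact List.mem_cons_of_mem _ hx)
          simpa [nsMapT] using this
        rw [htail, ih (n + 1) j]
        simp [nsSubst, hd]
      · have hidx : nsIdxs n (c :: rest) = nsIdxs (n + 1) rest := by
          simp [nsIdxs, h]
        have hnone : nsLook c = none := Option.not_isSome_iff_eq_none.mp h
        rw [hidx]
        simp only [nsMapT, PySem.List.enumerate_cons, List.map_cons]
        have hnot : PySem.Set.contains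
            (PySem.Set.ofList ((nsIdxs (n + 1) rest).take k)) n = false := by
          rw [Bool.eq_false_iff]
          intro hc
          have := (contains_ofList_iff _ _).mp hc
          have := nsIdxs_ge rest (n + 1) n (List.mem_of_mem_take this)
          omega
        rw [hnot]
        have : nsMapT ((nsIdxs (n + 1) rest).take k) (n + 1) rest = nsSubst k rest :=
          ih (n + 1) k
        simp only [nsMapT] at this
        rw [this]
        simp [nsSubst, hnone, hk0]

theorem alt_eq (passphrase : String) (count : Int) :
    number_subsitution_py_alt passphrase count = String.mk (nsSubst count.toNat passphrase.toList) := by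
  unfold number_subsitution_py_alt
  have h1 := nsIdxs_eq passphrase.toList 0
  have h2 := nsMapT_main passphrase.toList 0 count.toNat
  have hmax : (max count 0).toNat = count.toNat := by omega
  simp only [PySem.List.enumerate] at h1 ⊢
  rw [h1, hmax]
  simp only [nsMapT, PySem.List.enumerate] at h2
  rw [h2]

-- ===== VERDICT (by name: the statement is the Claim_ definition above) =====
theorem number_subsitution_py_spec : Claim_equal_number_subsitution_py := by
  intro passphrase count _
  unfold Spec_number_subsitution_py
  rw [alt_eq]
  unfold number_subsitution_py
  rw [nsLoopA_eq]
  simp
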